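-- pv_equiv track=rewrite | github.com/sainikhiljuluri/Invoiceparsing | parsers/text_cleaner.py | fix_common_ocr_errors
-- ===== SOURCE A (Python) =====
-- def fix_common_ocr_errors(text: str) -> str:
--     """Fix common OCR recognition errors"""
--     replacements = {
--         # Common character substitutions
--         'lnvoice': 'Invoice',
--         'Ihvoice': 'Invoice',
--         '|nvoice': 'Invoice',
--         'Arnount': 'Amount',
--         'Anount': 'Amount',
--         'Ouantity': 'Quantity',
--         'Prıce': 'Price',
--         'Totai': 'Total',
--         'Tota1': 'Total',
--         'Subtotai': 'Subtotal',
--     }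
--
--     for wrong, correct in replacements.items():
--         text = text.replace(wrong, correct)
--
--     return text
-- ===== SOURCE B (Python) =====
-- _REPLACEMENTS = [
--     ('lnvoice', 'Invoice'),
--     ('Ihvoice', 'Invoice'),
--     ('|nvoice', 'Invoice'),
--     ('Arnount', 'Amount'),
--     ('Anount', 'Amount'),
--     ('Ouantity', 'Quantity'),
--     ('Pr\u0131ce', 'Price'),
--     ('Totai', 'Total'),
--     ('Tota1', 'Total'),
--     ('Subtotai', 'Subtotal'),
-- ]
--
--
-- def fix_common_ocr_errors(text: str) -> str:
--     """Fix common OCR recognition errors (single left-to-right pass)."""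
--     out = []
--     i = 0
--     n = len(text)
--     while i < n:
--         for wrong, correct in _REPLACEMENTS:
--             if text.startswith(wrong, i):
--                 out.append(correct)
--                 i += len(wrong)
--                 break
--         else:
--             out.append(text[i])
--             i += 1
--     return ''.join(out)
-- ===== Notes on version B (the rewrite author's own statement) =====
-- stated objective: alternative
-- what changed: A applies ten separate full-text str.replace passes in dict order; B makes a single left-to-right pass over the text, emitting the correction for the first table key matching at the current position (the keys never overlap and no correction re-creates a later key, so one pass gives exactly the same result).
import Mathlib
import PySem

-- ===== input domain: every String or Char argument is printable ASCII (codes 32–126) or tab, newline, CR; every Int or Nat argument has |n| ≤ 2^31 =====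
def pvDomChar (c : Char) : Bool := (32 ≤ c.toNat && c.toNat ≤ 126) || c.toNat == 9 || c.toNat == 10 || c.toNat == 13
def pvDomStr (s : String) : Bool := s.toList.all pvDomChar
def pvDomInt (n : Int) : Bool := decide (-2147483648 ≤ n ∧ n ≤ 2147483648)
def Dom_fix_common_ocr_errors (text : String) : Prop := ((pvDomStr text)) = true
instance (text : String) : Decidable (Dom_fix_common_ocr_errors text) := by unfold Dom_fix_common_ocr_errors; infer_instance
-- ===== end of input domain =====

-- B replaces A's ten sequential full-text `replace` passes by one left-to-right scan with a
-- first-matching-key table; the return value is proved identical (no side effects involved).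

-- ===== PORT A =====
def fix_common_ocr_errors (text : String) : String :=
  let replacements : PySem.Dict String String := PySem.Dict.ofList
    [("lnvoice", "Invoice"),
     ("Ihvoice", "Invoice"),
     ("|nvoice", "Invoice"),
     ("Arnount", "Amount"),
     ("Anount", "Amount"),
     ("Ouantity", "Quantity"),
     ("Prıce", "Price"),
     ("Totai", "Total"),
     ("Tota1", "Total"),
     ("Subtotai", "Subtotal")]
  replacements.items.foldl (fun t p => PySem.Str.replace t p.1 p.2) text

-- ===== PORT B =====
-- Source B's module-level replacement table, as (wrong, correct) character lists
def pvTable : List (List Char × List Char) :=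
  [("lnvoice".toList, "Invoice".toList),
   ("Ihvoice".toList, "Invoice".toList),
   ("|nvoice".toList, "Invoice".toList),
   ("Arnount".toList, "Amount".toList),
   ("Anount".toList, "Amount".toList),
   ("Ouantity".toList, "Quantity".toList),
   ("Prıce".toList, "Price".toList),
   ("Totai".toList, "Total".toList),
   ("Tota1".toList, "Total".toList),
   ("Subtotai".toList, "Subtotal".toList)]

-- Source B's while-loop: at each position emit the correction of the first table key that
-- matches there (and skip it), otherwise copy one character.  The `w = []` guard is only
-- for termination; every key of pvTable is nonempty, so it is never taken.
def pvScan (L : List (List Char × List Char)) : List Char → List Char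
  | [] => []
  | c :: t =>
    match L.find? (fun p => p.1.isPrefixOf (c :: t)) with
    | some (w, v) =>
      if hw : w = [] then c :: pvScan L t
      else v ++ pvScan L ((c :: t).drop w.length)
    | none => c :: pvScan L t
termination_by s => s.length
decreasing_by
  all_goals simp [List.length_drop]
  all_goals (have : 1 ≤ w.length := List.length_pos_iff.mpr hw; omega)

def fix_common_ocr_errors_alt (text : String) : String :=
  String.ofList (pvScan pvTable text.toList)

-- ===== PRECONDITION & SPEC =====
def Spec_fix_common_ocr_errors (text : String) (out : String) : Prop := out = fix_common_ocr_errors_alt text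
instance (text : String) (out : String) : Decidable (Spec_fix_common_ocr_errors text out) := by unfold Spec_fix_common_ocr_errors; infer_instance

-- ===== CLAIM (what is proved, stated in full; the proofs are below) =====
def Claim_equal_fix_common_ocr_errors : Prop := ∀ (text : String), Dom_fix_common_ocr_errors text → Spec_fix_common_ocr_errors text (fix_common_ocr_errors text)

-- ===== LEMMAS AND PROOFS =====

-- single-key scan: structural form of Python's str.replace old→new
def pvRep1 (old new : List Char) : List Char → List Char
  | [] => []
  | c :: t =>
    if h : old.isPrefixOf (c :: t) ∧ old ≠ [] then new ++ pvRep1 old new ((c :: t).drop old.length)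
    else c :: pvRep1 old new t
termination_by s => s.length
decreasing_by
  all_goals simp [List.length_drop]
  all_goals (have : 1 ≤ old.length := List.length_pos_iff.mpr h.2; omega)

-- equation lemmas ----------------------------------------------------------

theorem pvRep1_nil (old new : List Char) : pvRep1 old new [] = [] := by
  simp [pvRep1]

theorem pvRep1_cons_match (old new : List Char) (c : Char) (t : List Char)
    (hp : old <+: (c :: t)) (h0 : old ≠ []) :
    pvRep1 old new (c :: t) = new ++ pvRep1 old new ((c :: t).drop old.length) := by
  rw [pvRep1]
  simp [List.isPrefixOf_iff_prefix, hp, h0]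

theorem pvRep1_cons_nomatch (old new : List Char) (c : Char) (t : List Char)
    (hp : ¬ old <+: (c :: t)) :
    pvRep1 old new (c :: t) = c :: pvRep1 old new t := by
  rw [pvRep1]
  simp [List.isPrefixOf_iff_prefix, hp]

theorem pvScan_nil (L : List (List Char × List Char)) : pvScan L [] = [] := by
  simp [pvScan]

theorem pvScan_cons_match (L : List (List Char × List Char)) (c : Char) (t w v : List Char)
    (hf : L.find? (fun p => p.1.isPrefixOf (c :: t)) = some (w, v)) (hw : w ≠ []) :
    pvScan L (c :: t) = v ++ pvScan L ((c :: t).drop w.length) := by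
  rw [pvScan]
  simp [hf, hw]

theorem pvScan_cons_none (L : List (List Char × List Char)) (c : Char) (t : List Char)
    (hf : L.find? (fun p => p.1.isPrefixOf (c :: t)) = none) :
    pvScan L (c :: t) = c :: pvScan L t := by
  rw [pvScan]
  simp [hf]

-- replace = pvRep1 ---------------------------------------------------------

theorem pvGo_spec (old new : List Char) (h : old ≠ []) :
    ∀ f l acc, l.length ≤ f →
      PySem.Chars.replace.go old new f l acc = acc.reverse ++ pvRep1 old new l := by
  intro f
  induction f with
  | zero =>
    intro l acc hl
    have hnil : l = [] := List.eq_nil_of_length_eq_zero (Nat.le_zero.mp hl)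
    subst hnil
    simp [PySem.Chars.replace.go, pvRep1_nil]
  | succ f ih =>
    intro l acc hl
    cases l with
    | nil => simp [PySem.Chars.replace.go, pvRep1_nil]
    | cons c t =>
      rw [PySem.Chars.replace.go]
      by_cases hp : old.isPrefixOf (c :: t)
      · have hp' : old <+: (c :: t) := List.isPrefixOf_iff_prefix.mp hp
        have h1 : 1 ≤ old.length := List.length_pos_iff.mpr h
        simp only [hp, if_true]
        rw [ih ((c :: t).drop old.length) (new.reverse ++ acc)
            (by have h1 : 1 ≤ old.length := List.length_pos_iff.mpr h; simp only [List.length_drop]; simp at hl ⊢; omega)]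
        rw [pvRep1_cons_match old new c t hp' h]
        simp
      · simp only [hp]
        rw [ih t (c :: acc) (by simp at hl ⊢; omega)]
        rw [pvRep1_cons_nomatch old new c t (fun hx => hp (List.isPrefixOf_iff_prefix.mpr hx))]
        simp

theorem pvReplace_eq_rep1 (old new : List Char) (h : old ≠ []) (s : List Char) :
    PySem.Chars.replace s old new = pvRep1 old new s := by
  rw [PySem.Chars.replace]
  rw [if_neg (show ¬ old.isEmpty = true by simp [h])]
  simpa using pvGo_spec old new h s.length s [] le_rfl

-- prefix facts -------------------------------------------------------------

theorem pvPrefix_append_cases {k a y : List Char} (h : k <+: a ++ y) : k <+: a ∨ a <+: k := by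
  by_cases hl : k.length ≤ a.length
  · exact Or.inl (List.prefix_of_prefix_length_le h (a.prefix_append y) hl)
  · exact Or.inr (List.prefix_of_prefix_length_le (a.prefix_append y) h
      (Nat.le_of_lt (Nat.lt_of_not_le hl)))

-- pushing a replace pass through a block the key cannot touch

theorem pvRep1_append (k v : List Char) (a y : List Char)
    (h : ∀ p, p < a.length → ¬ k <+: (a.drop p ++ y)) :
    pvRep1 k v (a ++ y) = a ++ pvRep1 k v y := by
  induction a with
  | nil => simp
  | cons c a' ih =>
    have h0 : ¬ k <+: (c :: (a' ++ y)) := by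
      have := h 0 (by simp)
      simpa using this
    have ih' := ih (fun p hp => by
      have := h (p + 1) (by simp; omega)
      simpa using this)
    rw [List.cons_append, pvRep1_cons_nomatch _ _ _ _ h0, ih']
    simp

-- the scan copies a region where no table key matches

theorem pvScan_copy (L : List (List Char × List Char)) :
    ∀ n s, n ≤ s.length →
      (∀ p, p < n → L.find? (fun q => q.1.isPrefixOf (s.drop p)) = none) →
      pvScan L s = s.take n ++ pvScan L (s.drop n) := by
  intro n
  induction n with
  | zero => intro s _ _; simp
  | succ n ih =>
    intro s hn hnone
    cases s with
    | nil => simp at hn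
    | cons c t =>
      have h0 := hnone 0 (Nat.succ_pos n)
      simp only [List.drop_zero] at h0
      rw [pvScan_cons_none L c t h0]
      rw [ih t (by simp at hn; omega) (fun p hp => by simpa using hnone (p + 1) (by omega))]
      simp

-- key-suffix matches in the scanned output come from the original text
-- (proper suffixes of k never meet a correction block, by the table conditions)

theorem pvScan_key_suffix (L : List (List Char × List Char)) (k : List Char)
    (hkeys : ∀ p ∈ L, p.1 ≠ [])
    (hC : ∀ p ∈ L, ∀ m, m < k.length → 1 ≤ m →
        ¬ (k.drop m) <+: p.2 ∧ ¬ p.2 <+: (k.drop m)) :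
    ∀ s m, 1 ≤ m → (k.drop m) <+: pvScan L s → (k.drop m) <+: s := by
  have main : ∀ b s, s.length ≤ b → ∀ m, 1 ≤ m → (k.drop m) <+: pvScan L s → (k.drop m) <+: s := by
    intro b
    induction b with
    | zero =>
      intro s hs m _ _
      have : s = [] := List.eq_nil_of_length_eq_zero (Nat.le_zero.mp hs)
      subst this
      simpa [pvScan_nil] using ‹(k.drop m) <+: pvScan L []›
    | succ b ih =>
      intro s hs m hm hpre
      by_cases hmk : k.length ≤ m
      · simp [List.drop_eq_nil_of_le hmk]
      replace hmk : m < k.length := Nat.lt_of_not_le hmk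
      cases s with
      | nil => simpa [pvScan_nil] using hpre
      | cons c t =>
        cases hf : L.find? (fun p => p.1.isPrefixOf (c :: t)) with
        | none =>
          rw [pvScan_cons_none L c t hf] at hpre
          rw [List.drop_eq_getElem_cons hmk] at hpre ⊢
          rw [List.cons_prefix_cons] at hpre ⊢
          refine ⟨hpre.1, ?_⟩
          by_cases hmk1 : k.length ≤ m + 1
          · simp [List.drop_eq_nil_of_le hmk1]
          · have := ih t (by simp at hs; omega) (m + 1) (by omega) hpre.2
            exact this
        | some wv =>
          obtain ⟨w, v⟩ := wv
          have hwmem : (w, v) ∈ L := List.mem_of_find?_eq_some hf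
          have hw : w ≠ [] := hkeys _ hwmem
          rw [pvScan_cons_match L c t w v hf hw] at hpre
          rcases pvPrefix_append_cases hpre with hca | hca
          · exact absurd hca (hC _ hwmem m hmk hm).1
          · exact absurd hca (hC _ hwmem m hmk hm).2
  intro s
  exact main s.length s le_rfl
def pvStepOK (L : List (List Char × List Char)) (k : List Char) : Prop :=
  k ≠ [] ∧ (∀ p ∈ L, p.1 ≠ []) ∧
  (∀ p ∈ L, ∀ m, m < k.length → 1 ≤ m →
      ¬ (k.drop m) <+: p.2 ∧ ¬ p.2 <+: (k.drop m)) ∧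
  (∀ p ∈ L, ∀ q, q < p.2.length →
      ¬ k <+: (p.2.drop q) ∧ ¬ (p.2.drop q) <+: k) ∧
  (∀ p ∈ L, ∀ q, q < k.length → 1 ≤ q →
      ¬ p.1 <+: (k.drop q) ∧ ¬ (k.drop q) <+: p.1)

theorem pvRep1_match (old new s : List Char) (hp : old <+: s) (h0 : old ≠ []) :
    pvRep1 old new s = new ++ pvRep1 old new (s.drop old.length) := by
  cases s with
  | nil => exact absurd (List.prefix_nil.mp hp) h0
  | cons c t => exact pvRep1_cons_match old new c t hp h0

theorem pvFind?_append_some {α : Type} (L M : List α) (p : α → Bool) (x : α)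
    (h : L.find? p = some x) : (L ++ M).find? p = some x := by
  induction L with
  | nil => simp at h
  | cons a L ih =>
    by_cases hpa : p a
    · simp only [List.cons_append, List.find?_cons_of_pos hpa] at h ⊢; exact h
    · simp only [List.cons_append, List.find?_cons_of_neg hpa] at h ⊢; exact ih h

theorem pvFind?_append_none {α : Type} (L M : List α) (p : α → Bool)
    (h : L.find? p = none) : (L ++ M).find? p = M.find? p := by
  induction L with
  | nil => simp
  | cons a L ih =>
    by_cases hpa : p a
    · simp only [List.find?_cons_of_pos hpa] at h
      exact absurd h (by simp)
    · simp only [List.find?_cons_of_neg hpa] at h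
      simp only [List.cons_append, List.find?_cons_of_neg hpa]
      exact ih h

theorem pvStep (L : List (List Char × List Char)) (k v : List Char) (hOK : pvStepOK L k)
    (s : List Char) : pvRep1 k v (pvScan L s) = pvScan (L ++ [(k, v)]) s := by
  obtain ⟨hk, hkeys, hC, hC2, hC4⟩ := hOK
  have hk1 : 1 ≤ k.length := List.length_pos_iff.mpr hk
  have main : ∀ b s, s.length ≤ b → pvRep1 k v (pvScan L s) = pvScan (L ++ [(k, v)]) s := by
    intro b
    induction b with
    | zero =>
      intro s hs
      have : s = [] := List.eq_nil_of_length_eq_zero (Nat.le_zero.mp hs)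
      subst this
      simp [pvScan_nil, pvRep1_nil]
    | succ b ih =>
      intro s hs
      cases s with
      | nil => simp [pvScan_nil, pvRep1_nil]
      | cons c t =>
        cases hf : L.find? (fun p => p.1.isPrefixOf (c :: t)) with
        | some wv =>
          obtain ⟨w, vw⟩ := wv
          have hwmem : (w, vw) ∈ L := List.mem_of_find?_eq_some hf
          have hw : w ≠ [] := hkeys _ hwmem
          have hw1 : 1 ≤ w.length := List.length_pos_iff.mpr hw
          rw [pvScan_cons_match L c t w vw hf hw]
          rw [pvScan_cons_match (L ++ [(k, v)]) c t w vw
            (pvFind?_append_some L [(k, v)] _ _ hf) hw]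
          rw [pvRep1_append k v vw _ (fun p hp hcon => by
            rcases pvPrefix_append_cases hcon with hca | hca
            · exact (hC2 _ hwmem p hp).1 hca
            · exact (hC2 _ hwmem p hp).2 hca)]
          rw [ih ((c :: t).drop w.length) (by simp [List.length_drop] at hs ⊢; omega)]
        | none =>
          by_cases hkp : k <+: (c :: t)
          · -- k matches here: the scan over L copies k's span verbatim
            obtain ⟨r, hr⟩ := hkp
            have hcopy := pvScan_copy L k.length (c :: t)
              (by rw [← hr]; simp)
              (fun p hp => by
                rcases Nat.eq_zero_or_pos p with h0 | h1
                · subst h0; simpa using hf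
                · refine List.find?_eq_none.mpr (fun q hq => ?_)
                  simp only [List.isPrefixOf_iff_prefix]
                  intro hcon
                  rw [← hr, List.drop_append_of_le_length (Nat.le_of_lt hp)] at hcon
                  rcases pvPrefix_append_cases hcon with hca | hca
                  · exact (hC4 _ hq p hp h1).1 hca
                  · exact (hC4 _ hq p hp h1).2 hca)
            have htake : (c :: t).take k.length = k := by
              rw [← hr, List.take_left]
            rw [hcopy, htake]
            rw [pvRep1_match k v _ (k.prefix_append _) hk]
            rw [List.drop_left]
            rw [ih ((c :: t).drop k.length) (by simp [List.length_drop] at hs ⊢; omega)]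
            have hfind' : (L ++ [(k, v)]).find? (fun p => p.1.isPrefixOf (c :: t)) =
                some (k, v) := by
              rw [pvFind?_append_none L _ _ hf]
              have hpk : k.isPrefixOf (c :: t) = true :=
                List.isPrefixOf_iff_prefix.mpr ⟨r, hr⟩
              simp [List.find?, hpk]
            rw [pvScan_cons_match (L ++ [(k, v)]) c t k v hfind' hk]
          · -- no key matches here: both sides copy c
            have hnok : ¬ k <+: (c :: pvScan L t) := by
              intro hcon
              cases k with
              | nil => exact hk rfl
              | cons kc kt =>
                rw [List.cons_prefix_cons] at hcon
                have hkt : kt <+: t := by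
                  have := pvScan_key_suffix L (kc :: kt) hkeys hC t 1 le_rfl
                    (by simpa using hcon.2)
                  simpa using this
                exact hkp (List.cons_prefix_cons.mpr ⟨hcon.1, hkt⟩)
            rw [pvScan_cons_none L c t hf]
            rw [pvRep1_cons_nomatch k v _ _ hnok]
            rw [ih t (by simp at hs; omega)]
            have hfind' : (L ++ [(k, v)]).find? (fun p => p.1.isPrefixOf (c :: t)) =
                none := by
              rw [pvFind?_append_none L _ _ hf]
              exact List.find?_eq_none.mpr (by
                intro q hq
                simp only [List.mem_singleton] at hq
                subst hq
                simpa [List.isPrefixOf_iff_prefix] using hkp)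
            rw [pvScan_cons_none (L ++ [(k, v)]) c t hfind']
  exact main s.length s le_rfl

-- the empty table scans to the identity
theorem pvScan_nil_table (s : List Char) : pvScan ([] : List (List Char × List Char)) s = s := by
  induction s with
  | nil => exact pvScan_nil []
  | cons c t ih => rw [pvScan_cons_none [] c t (by simp [List.find?])]; rw [ih]

-- A's ten replace passes, fused pass by pass into the scan over the growing table
theorem pvChain_eq_scan (s : List Char) :
    pvRep1 "Subtotai".toList "Subtotal".toList
      (pvRep1 "Tota1".toList "Total".toList
        (pvRep1 "Totai".toList "Total".toList
          (pvRep1 "Prıce".toList "Price".toList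
            (pvRep1 "Ouantity".toList "Quantity".toList
              (pvRep1 "Anount".toList "Amount".toList
                (pvRep1 "Arnount".toList "Amount".toList
                  (pvRep1 "|nvoice".toList "Invoice".toList
                    (pvRep1 "Ihvoice".toList "Invoice".toList
                      (pvRep1 "lnvoice".toList "Invoice".toList s))))))))) =
    pvScan pvTable s := by
  conv_lhs => rw [← pvScan_nil_table s]
  rw [pvStep _ _ _ (by unfold pvStepOK; decide) s]
  rw [pvStep _ _ _ (by unfold pvStepOK; decide)]
  rw [pvStep _ _ _ (by unfold pvStepOK; decide)]
  rw [pvStep _ _ _ (by unfold pvStepOK; decide)]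
  rw [pvStep _ _ _ (by unfold pvStepOK; decide)]
  rw [pvStep _ _ _ (by unfold pvStepOK; decide)]
  rw [pvStep _ _ _ (by unfold pvStepOK; decide)]
  rw [pvStep _ _ _ (by unfold pvStepOK; decide)]
  rw [pvStep _ _ _ (by unfold pvStepOK; decide)]
  rw [pvStep _ _ _ (by unfold pvStepOK; decide)]
  rfl

theorem fix_common_ocr_errors_spec : Claim_equal_fix_common_ocr_errors := by
  intro text _
  unfold Spec_fix_common_ocr_errors fix_common_ocr_errors fix_common_ocr_errors_alt
  have hitems : (PySem.Dict.ofList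
      [("lnvoice", "Invoice"), ("Ihvoice", "Invoice"), ("|nvoice", "Invoice"),
       ("Arnount", "Amount"), ("Anount", "Amount"), ("Ouantity", "Quantity"),
       ("Prıce", "Price"), ("Totai", "Total"), ("Tota1", "Total"),
       ("Subtotai", "Subtotal")] : PySem.Dict String String).items =
      [("lnvoice", "Invoice"), ("Ihvoice", "Invoice"), ("|nvoice", "Invoice"),
       ("Arnount", "Amount"), ("Anount", "Amount"), ("Ouantity", "Quantity"),
       ("Prıce", "Price"), ("Totai", "Total"), ("Tota1", "Total"),
       ("Subtotai", "Subtotal")] := by rfl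
  show List.foldl (fun t p => PySem.Str.replace t p.1 p.2) text
      (PySem.Dict.ofList
        [("lnvoice", "Invoice"), ("Ihvoice", "Invoice"), ("|nvoice", "Invoice"),
       ("Arnount", "Amount"), ("Anount", "Amount"), ("Ouantity", "Quantity"),
       ("Prıce", "Price"), ("Totai", "Total"), ("Tota1", "Total"),
       ("Subtotai", "Subtotal")] : PySem.Dict String String).items =
    String.ofList (pvScan pvTable text.toList)
  rw [hitems]
  simp only [List.foldl_cons, List.foldl_nil]
  simp only [PySem.Str.replace, String.toList_ofList]
  rw [pvReplace_eq_rep1 _ _ (by decide), pvReplace_eq_rep1 _ _ (by decide),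
      pvReplace_eq_rep1 _ _ (by decide), pvReplace_eq_rep1 _ _ (by decide),
      pvReplace_eq_rep1 _ _ (by decide), pvReplace_eq_rep1 _ _ (by decide),
      pvReplace_eq_rep1 _ _ (by decide), pvReplace_eq_rep1 _ _ (by decide),
      pvReplace_eq_rep1 _ _ (by decide), pvReplace_eq_rep1 _ _ (by decide)]
  rw [pvChain_eq_scan]
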